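-- pv_equiv track=rewrite | github.com/isun-dev/baekjoon_algorithm | test1.py | solution
-- ===== SOURCE A (Python) =====
-- def solution(id_list, k):
--     answer = 0
--     arr = list()
--     count = {}
--
--     for i in id_list:
--         arr.append(list(set(i.split())))
--
--     for j in arr:
--         for h in j:
--             try:
--                 count[h] += 1
--             except:
--                 count[h] = 1
--
--     for key, value in count.items():
--         if value > k:
--             answer += k
--         else:
--             answer += value
--
--     return answer
-- ===== SOURCE B (Python) =====
-- def solution(id_list, k):
--     tokens = []
--     for i in id_list:
--         tokens.extend(set(i.split()))
--     tokens.sort()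
--     answer = 0
--     run = 0
--     prev = None
--     for t in tokens:
--         if t == prev:
--             run += 1
--         else:
--             if run:
--                 answer += min(run, k)
--             run = 1
--             prev = t
--     if run:
--         answer += min(run, k)
--     return answer
-- ===== Notes on version B (the rewrite author's own statement) =====
-- stated objective: alternative
-- what changed: Replaces the hash-map frequency table and the separate summation pass over count.items() with sort-then-run-scan: all per-entry-deduped tokens are collected into one list, sorted, and a single scan over equal-token runs accumulates min(run_length, k).
import Mathlib
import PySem

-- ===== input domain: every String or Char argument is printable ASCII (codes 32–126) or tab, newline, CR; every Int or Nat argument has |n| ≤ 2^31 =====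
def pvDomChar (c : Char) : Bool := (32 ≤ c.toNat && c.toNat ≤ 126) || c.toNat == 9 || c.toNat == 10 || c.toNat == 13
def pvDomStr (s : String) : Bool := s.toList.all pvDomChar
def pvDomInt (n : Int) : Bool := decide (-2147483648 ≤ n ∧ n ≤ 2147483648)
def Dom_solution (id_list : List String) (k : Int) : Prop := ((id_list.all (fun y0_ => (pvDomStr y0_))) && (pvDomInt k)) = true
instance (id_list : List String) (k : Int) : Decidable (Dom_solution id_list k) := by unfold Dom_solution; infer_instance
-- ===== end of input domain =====

-- B replaces A's frequency dict and the separate pass over count.items() by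
-- sorting all per-entry-deduped tokens and scanning equal-token runs once.

-- ===== PORT A =====
-- try: count[h] += 1  except: count[h] = 1
def solCountStep (count : PySem.Dict String Int) (h : String) : PySem.Dict String Int :=
  match count.get? h with
  | some v => count.insert h (v + 1)
  | none => count.insert h 1

def solution (id_list : List String) (k : Int) : Int :=
  let arr : List (List String) :=
    id_list.foldl (fun arr i => arr ++ [PySem.Set.ofList (PySem.Str.split₀ i)]) []
  let count : PySem.Dict String Int :=
    arr.foldl (fun count j => j.foldl solCountStep count) PySem.Dict.empty
  count.items.foldl (fun answer kv => if kv.2 > k then answer + k else answer + kv.2) 0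

-- ===== PORT B =====
-- loop body of B's run scan: state = (answer, run, prev)
def solScanStep (k : Int) (s : Int × Int × Option String) (t : String) : Int × Int × Option String :=
  if some t = s.2.2 then (s.1, s.2.1 + 1, s.2.2)
  else ((if s.2.1 ≠ 0 then s.1 + min s.2.1 k else s.1), 1, some t)

def solution_alt (id_list : List String) (k : Int) : Int :=
  let tokens : List String :=
    id_list.foldl (fun tokens i => tokens ++ PySem.Set.ofList (PySem.Str.split₀ i)) []
  let ts := PySem.List.sorted tokens (fun x => x) false
  let st := ts.foldl (solScanStep k) (0, 0, none)
  if st.2.1 ≠ 0 then st.1 + min st.2.1 k else st.1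

-- ===== PRECONDITION & SPEC =====
def Spec_solution (id_list : List String) (k : Int) (out : Int) : Prop := out = solution_alt id_list k
instance (id_list : List String) (k : Int) (out : Int) : Decidable (Spec_solution id_list k out) := by unfold Spec_solution; infer_instance

-- ===== CLAIM (what is proved, stated in full; the proofs are below) =====
def Claim_equal_solution : Prop := ∀ (id_list : List String) (k : Int), Dom_solution id_list k → Spec_solution id_list k (solution id_list k)

-- ===== LEMMAS AND PROOFS =====

-- the common value: sum over distinct tokens of min(count, k)
def capSum (k : Int) (zs : List String) : Int :=
  ((PySem.Set.ofList zs).map (fun u => min ((zs.count u : Int)) k)).sum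

theorem add_of_mem (s : PySem.Set String) (u : String) (hu : u ∈ s) : PySem.Set.add s u = s := by
  simp [PySem.Set.add, PySem.Set.contains, hu]

theorem foldl_add_filter (u : String) (zs : List String) : ∀ (s : PySem.Set String), u ∈ s →
    zs.foldl PySem.Set.add s = (zs.filter (fun v => v ≠ u)).foldl PySem.Set.add s := by
  induction zs with
  | nil => intro s _; rfl
  | cons v zs ih =>
    intro s hu
    by_cases hv : v = u
    · subst hv
      rw [List.foldl_cons, add_of_mem s v hu, List.filter_cons_of_neg (by simp)]
      exact ih s hu
    · rw [List.foldl_cons, List.filter_cons_of_pos (by simp [hv]), List.foldl_cons]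
      refine ih (PySem.Set.add s v) ?_
      simp only [PySem.Set.add]
      split
      · exact hu
      · exact List.mem_append_left _ hu

theorem foldl_add_front (u : String) (zs : List String) : ∀ (s : List String), u ∉ zs →
    zs.foldl PySem.Set.add (u :: s) = u :: zs.foldl PySem.Set.add s := by
  induction zs with
  | nil => intro s _; rfl
  | cons v zs ih =>
    intro s hu
    have hvu : (v == u) = false := by
      simp only [beq_eq_false_iff_ne, ne_eq]
      intro h; exact hu (h ▸ List.mem_cons_self)
    simp only [List.foldl_cons]
    have hstep : PySem.Set.add (u :: s) v = u :: PySem.Set.add s v := by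
      simp only [PySem.Set.add, PySem.Set.contains, List.contains_cons, hvu, Bool.false_or]
      split
      · rfl
      · rfl
    rw [hstep]
    exact ih _ (fun h => hu (List.mem_cons_of_mem _ h))

theorem ofList_cons_filter (u : String) (zs : List String) :
    PySem.Set.ofList (u :: zs) = u :: PySem.Set.ofList (zs.filter (fun v => v ≠ u)) := by
  rw [PySem.Set.ofList_eq_foldl, PySem.Set.ofList_eq_foldl, List.foldl_cons]
  have h0 : PySem.Set.add ([] : PySem.Set String) u = [u] := by
    simp [PySem.Set.add, PySem.Set.contains]
  rw [h0, foldl_add_filter u zs [u] List.mem_cons_self]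
  have hnot : u ∉ zs.filter (fun v => v ≠ u) := by simp
  exact foldl_add_front u _ [] hnot

theorem capSum_cons (k : Int) (u : String) (zs : List String) :
    capSum k (u :: zs) = min ((1 + (zs.count u : Int))) k + capSum k (zs.filter (fun v => v ≠ u)) := by
  unfold capSum
  rw [ofList_cons_filter]
  simp only [List.map_cons, List.sum_cons]
  congr 1
  · congr 1
    rw [List.count_cons_self]
    push_cast
    ring
  · apply congrArg
    apply List.map_congr_left
    intro v hv
    have hvz : v ∈ zs.filter (fun w => w ≠ u) := (PySem.Set.mem_ofList _ v).1 hv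
    have hvne : v ≠ u := by
      have := List.of_mem_filter hvz
      simpa using this
    rw [List.count_filter (by simpa using hvne)]
    simp [Ne.symm hvne]

theorem capSum_perm (k : Int) (zs ys : List String) (h : zs.Perm ys) : capSum k zs = capSum k ys := by
  unfold capSum
  have hperm : (PySem.Set.ofList zs).Perm (PySem.Set.ofList ys) :=
    (List.perm_ext_iff_of_nodup (PySem.Set.nodup_ofList zs) (PySem.Set.nodup_ofList ys)).2
      (fun a => by simp only [PySem.Set.mem_ofList]; exact h.mem_iff)
  have hmap : List.map (fun u => min ((zs.count u : Int)) k) (PySem.Set.ofList zs)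
      = List.map (fun u => min ((ys.count u : Int)) k) (PySem.Set.ofList zs) := by
    apply List.map_congr_left
    intro v _
    rw [h.count_eq]
  rw [hmap]
  exact (hperm.map _).sum_eq

theorem scan_inv (k : Int) (zs : List String) : ∀ (ans r : Int) (t : String), 1 ≤ r →
    zs.Pairwise (fun a b => a ≤ b) → (∀ u ∈ zs, t ≤ u) →
    (if (zs.foldl (solScanStep k) (ans, r, some t)).2.1 ≠ 0
      then (zs.foldl (solScanStep k) (ans, r, some t)).1 + min (zs.foldl (solScanStep k) (ans, r, some t)).2.1 k
      else (zs.foldl (solScanStep k) (ans, r, some t)).1)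
      = ans + min (r + (zs.count t : Int)) k + capSum k (zs.filter (fun v => v ≠ t)) := by
  induction zs with
  | nil =>
    intro ans r t hr _ _
    simp only [List.foldl_nil, List.count_nil, List.filter_nil]
    have : r ≠ 0 := by omega
    simp [this, capSum]
  | cons u zs ih =>
    intro ans r t hr hpw hall
    have hpwtail : zs.Pairwise (fun a b => a ≤ b) := hpw.tail
    have huall : ∀ w ∈ zs, u ≤ w := fun w hw => List.rel_of_pairwise_cons hpw hw
    by_cases hut : u = t
    · subst hut
      have hstep : solScanStep k (ans, r, some u) u = (ans, r + 1, some u) := by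
        simp [solScanStep]
      rw [List.foldl_cons, hstep]
      rw [ih ans (r + 1) u (by omega) hpwtail huall]
      have hfil : List.filter (fun v => decide (v ≠ u)) (u :: zs) = List.filter (fun v => decide (v ≠ u)) zs := by
        simp
      rw [hfil, List.count_cons_self]
      push_cast
      omega
    · have htu : t ≤ u := hall u List.mem_cons_self
      have htne : t ≠ u := fun h => hut h.symm
      have htlt : t < u := lt_of_le_of_ne htu htne
      have htnotz : t ∉ zs := fun h => absurd (huall t h) (not_le.mpr htlt)
      have hstep : solScanStep k (ans, r, some t) u = (ans + min r k, 1, some u) := by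
        have h1 : ¬ (some u = some t) := by simp [hut]
        have hrne : r ≠ 0 := by omega
        simp [solScanStep, h1, hrne]
      rw [List.foldl_cons, hstep]
      rw [ih (ans + min r k) 1 u le_rfl hpwtail huall]
      have hcnt : List.count t (u :: zs) = 0 := by
        rw [List.count_eq_zero]
        intro hmem
        rcases List.mem_cons.1 hmem with h | h
        · exact hut h.symm
        · exact htnotz h
      have hfil : List.filter (fun v => decide (v ≠ t)) (u :: zs) = u :: zs := by
        rw [List.filter_eq_self]
        intro a ha
        rcases List.mem_cons.1 ha with h | h
        · subst h; simpa using hut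
        · simp only [decide_eq_true_eq, ne_eq]
          intro h'
          exact htnotz (h' ▸ h)
      rw [hcnt, hfil, capSum_cons]
      push_cast
      omega

theorem scan_eq_capSum (k : Int) (ys : List String) (h : ys.Pairwise (fun a b => a ≤ b)) :
    (if (ys.foldl (solScanStep k) (0, 0, none)).2.1 ≠ 0
      then (ys.foldl (solScanStep k) (0, 0, none)).1 + min (ys.foldl (solScanStep k) (0, 0, none)).2.1 k
      else (ys.foldl (solScanStep k) (0, 0, none)).1) = capSum k ys := by
  cases ys with
  | nil => simp [capSum, PySem.Set.ofList_eq_foldl]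
  | cons u zs =>
    have hstep : solScanStep k (0, 0, none) u = (0, 1, some u) := by
      simp [solScanStep]
    rw [List.foldl_cons, hstep,
      scan_inv k zs 0 1 u le_rfl h.tail (fun w hw => List.rel_of_pairwise_cons h hw)]
    rw [capSum_cons]
    omega

theorem solution_eq_capSum (id_list : List String) (k : Int) :
    solution id_list k
      = capSum k (id_list.foldl (fun tokens i => tokens ++ PySem.Set.ofList (PySem.Str.split₀ i)) []) := by
  simp only [solution]
  rw [PySem.List.foldl_append_singleton_eq_map, PySem.List.foldl_append_eq_flatMap,
    List.nil_append, List.nil_append, List.flatMap_def, ← List.foldl_flatten]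
  have hstep : solCountStep = (fun (d : PySem.Dict String Int) x => d.insert x (d.getD x 0 + 1)) := by
    funext d h
    unfold solCountStep
    rw [PySem.Dict.getD_eq_get?_getD]
    cases hg : d.get? h with
    | some v => simp
    | none => simp
  rw [hstep, PySem.Dict.foldl_insert_getD_add_one_eq_counter, PySem.Dict.items_counter,
    List.foldl_map]
  have hbody : (fun (answer : Int) (u : String) =>
      if (((List.map (fun i => PySem.Set.ofList (PySem.Str.split₀ i)) id_list).flatten.count u : Int)) > k
      then answer + k
      else answer + (((List.map (fun i => PySem.Set.ofList (PySem.Str.split₀ i)) id_list).flatten.count u : Int)))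
      = fun answer u => answer + min (((List.map (fun i => PySem.Set.ofList (PySem.Str.split₀ i)) id_list).flatten.count u : Int)) k := by
    funext a u
    split_ifs with hc
    · rw [min_eq_right (le_of_lt hc)]
    · rw [min_eq_left (not_lt.mp hc)]
  simp only [hbody]
  rw [PySem.List.foldl_add]
  simp [capSum]

-- ===== VERDICT (by name: the statement is the Claim_ definition above) =====
theorem solution_spec : Claim_equal_solution := by
  intro id_list k _
  unfold Spec_solution
  simp only [solution_alt]
  rw [solution_eq_capSum]
  rw [scan_eq_capSum k _ (PySem.List.sorted_pairwise _ _)]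
  exact capSum_perm k _ _ (PySem.List.sorted_perm _ _ _).symm
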